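-- pv_equiv track=rewrite | github.com/motasemalj/EllipseSearch | rpa/utils/source_utils.py | is_excluded_domain
-- ===== SOURCE A (Python) =====
-- from typing import Dict, Iterable, List, Optional, Sequence, Set, Tuple
--
-- def is_excluded_domain(domain: str, exclude_domains: Sequence[str]) -> bool:
--     d = domain.lower().strip()
--     for ex in exclude_domains:
--         exn = ex.lower().strip()
--         if not exn:
--             continue
--         if d == exn or d.endswith(f".{exn}"):
--             return True
--     return False
-- ===== SOURCE B (Python) =====
-- def is_excluded_domain(domain, exclude_domains):
--     excluded = set()
--     for ex in exclude_domains: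
--         exn = ex.lower().strip()
--         if exn:
--             excluded.add(exn)
--     d = domain.lower().strip()
--     candidates = [d]
--     for i, ch in enumerate(d):
--         if ch == '.':
--             candidates.append(d[i + 1:])
--     return any(c in excluded for c in candidates)
-- ===== Notes on version B (the rewrite author's own statement) =====
-- stated objective: alternative
-- what changed: Instead of scanning every exclusion and testing endswith on each, B builds a set of normalized non-empty exclusions once and then checks the domain's dot-boundary suffixes (the whole domain plus each tail after a '.') for set membership.
import Mathlib
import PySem

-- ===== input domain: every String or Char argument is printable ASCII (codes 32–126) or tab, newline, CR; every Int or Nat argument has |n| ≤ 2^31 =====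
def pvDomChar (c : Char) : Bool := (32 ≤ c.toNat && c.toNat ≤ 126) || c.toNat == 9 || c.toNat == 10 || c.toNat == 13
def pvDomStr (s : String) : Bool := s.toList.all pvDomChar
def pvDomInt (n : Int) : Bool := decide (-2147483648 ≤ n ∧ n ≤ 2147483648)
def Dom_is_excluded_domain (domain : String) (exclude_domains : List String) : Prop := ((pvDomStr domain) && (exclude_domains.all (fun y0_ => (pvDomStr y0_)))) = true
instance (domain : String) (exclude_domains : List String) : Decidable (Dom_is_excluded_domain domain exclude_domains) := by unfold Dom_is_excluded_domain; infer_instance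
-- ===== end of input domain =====

-- B replaces A's per-exclusion endswith scan by one normalized exclusion set plus a
-- membership test on the domain's dot-boundary suffixes (objective: alternative).

-- ===== PORT A =====
-- ex.lower().strip() — shared normalizer (both Pythons compute exactly this)
def isExNorm (ex : String) : List Char := PySem.Chars.strip (PySem.Chars.lower ex.toList)

-- A's for-loop with early return, as structural recursion over the exclusions
def isExGoA (d : List Char) : List String → Bool
  | [] => false
  | ex :: rest =>
    let exn := isExNorm ex
    if exn = [] then isExGoA d rest
    else if d = exn ∨ PySem.Chars.endswith d ('.' :: exn) then true
    else isExGoA d rest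

def is_excluded_domain (domain : String) (exclude_domains : List String) : Bool :=
  isExGoA (PySem.Chars.strip (PySem.Chars.lower domain.toList)) exclude_domains

-- ===== PORT B =====
-- the set of normalized, non-empty exclusions (Source B's first loop)
def isExSet (exclude_domains : List String) : PySem.Set (List Char) :=
  exclude_domains.foldl
    (fun s ex => let exn := isExNorm ex; if exn = [] then s else PySem.Set.add s exn)
    PySem.Set.empty

-- Source B's second loop: the tail after each '.' of d, in order
def isExDotSuffixes : List Char → List (List Char)
  | [] => []
  | c :: rest => (if c = '.' then [rest] else []) ++ isExDotSuffixes rest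

def is_excluded_domain_alt (domain : String) (exclude_domains : List String) : Bool :=
  let excluded := isExSet exclude_domains
  let d := PySem.Chars.strip (PySem.Chars.lower domain.toList)
  (d :: isExDotSuffixes d).any (fun c => PySem.Set.contains excluded c)

-- ===== PRECONDITION & SPEC =====
def Spec_is_excluded_domain (domain : String) (exclude_domains : List String) (out : Bool) : Prop := out = is_excluded_domain_alt domain exclude_domains
instance (domain : String) (exclude_domains : List String) (out : Bool) : Decidable (Spec_is_excluded_domain domain exclude_domains out) := by unfold Spec_is_excluded_domain; infer_instance

-- ===== CLAIM (what is proved, stated in full; the proofs are below) =====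
def Claim_equal_is_excluded_domain : Prop := ∀ (domain : String) (exclude_domains : List String), Dom_is_excluded_domain domain exclude_domains → Spec_is_excluded_domain domain exclude_domains (is_excluded_domain domain exclude_domains)

-- ===== LEMMAS AND PROOFS =====

-- A's early-return loop returns true iff some exclusion matches
theorem isExGoA_iff (d : List Char) (exs : List String) :
    isExGoA d exs = true ↔
      ∃ ex ∈ exs, isExNorm ex ≠ [] ∧ (d = isExNorm ex ∨ '.' :: isExNorm ex <:+ d) := by
  induction exs with
  | nil => simp [isExGoA]
  | cons ex rest ih =>
    simp only [isExGoA]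
    by_cases h0 : isExNorm ex = []
    · simp [h0, ih]
    · by_cases hm : d = isExNorm ex ∨ PySem.Chars.endswith d ('.' :: isExNorm ex)
      · rw [if_neg h0, if_pos hm]
        refine ⟨fun _ => ⟨ex, by simp, h0, hm.imp id ((PySem.Chars.endswith_iff d _).mp)⟩, fun _ => rfl⟩
      · rw [if_neg h0, if_neg hm, ih]
        constructor
        · rintro ⟨e, he, hne, hcase⟩; exact ⟨e, by simp [he], hne, hcase⟩
        · rintro ⟨e, he, hne, hcase⟩
          rcases List.mem_cons.mp he with rfl | he'
          · exact absurd (hcase.imp id ((PySem.Chars.endswith_iff d _).mpr)) hm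
          · exact ⟨e, he', hne, hcase⟩

-- membership in B's exclusion set
theorem mem_isExSet_aux (exs : List String) (s : PySem.Set (List Char)) (c : List Char) :
    c ∈ exs.foldl
        (fun s ex => let exn := isExNorm ex; if exn = [] then s else PySem.Set.add s exn) s
      ↔ c ∈ s ∨ ∃ ex ∈ exs, isExNorm ex = c ∧ c ≠ [] := by
  induction exs generalizing s with
  | nil => simp
  | cons ex rest ih =>
    simp only [List.foldl_cons]
    by_cases h0 : isExNorm ex = []
    · rw [if_pos h0, ih]
      constructor
      · rintro (h | ⟨e, he, hc, hne⟩)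
        · exact Or.inl h
        · exact Or.inr ⟨e, List.mem_cons_of_mem _ he, hc, hne⟩
      · rintro (h | ⟨e, he, hc, hne⟩)
        · exact Or.inl h
        · rcases List.mem_cons.mp he with rfl | he'
          · exact absurd (hc ▸ h0) hne
          · exact Or.inr ⟨e, he', hc, hne⟩
    · rw [if_neg h0, ih]
      simp only [PySem.Set.mem_add]
      constructor
      · rintro ((h | h) | ⟨e, he, hc, hne⟩)
        · exact Or.inl h
        · exact Or.inr ⟨ex, by simp, h.symm, by rw [h]; exact h0⟩
        · exact Or.inr ⟨e, List.mem_cons_of_mem _ he, hc, hne⟩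
      · rintro (h | ⟨e, he, hc, hne⟩)
        · exact Or.inl (Or.inl h)
        · rcases List.mem_cons.mp he with rfl | he'
          · exact Or.inl (Or.inr hc.symm)
          · exact Or.inr ⟨e, he', hc, hne⟩

theorem mem_isExSet (exs : List String) (c : List Char) :
    c ∈ isExSet exs ↔ ∃ ex ∈ exs, isExNorm ex = c ∧ c ≠ [] := by
  rw [isExSet, mem_isExSet_aux]; simp [PySem.Set.empty]

-- dot-boundary suffixes of d are exactly the tails preceded by a '.'
theorem mem_isExDotSuffixes (d exn : List Char) :
    exn ∈ isExDotSuffixes d ↔ '.' :: exn <:+ d := by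
  induction d with
  | nil => simp [isExDotSuffixes]
  | cons c rest ih =>
    simp only [isExDotSuffixes, List.mem_append, ih, List.suffix_cons_iff]
    constructor
    · rintro (h | h)
      · split_ifs at h with hc
        · simp only [List.mem_singleton] at h; exact Or.inl (by rw [h, hc])
        · simp at h
      · exact Or.inr h
    · rintro (h | h)
      · obtain ⟨hc, hr⟩ := List.cons_eq_cons.mp h
        exact Or.inl (by simp [← hc, hr.symm])
      · exact Or.inr h

-- ===== VERDICT (by name: the statement is the Claim_ definition above) =====
theorem is_excluded_domain_spec : Claim_equal_is_excluded_domain := by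
  intro domain exclude_domains _
  unfold Spec_is_excluded_domain is_excluded_domain is_excluded_domain_alt
  set d := PySem.Chars.strip (PySem.Chars.lower domain.toList) with hd
  clear_value d
  rw [Bool.eq_iff_iff, isExGoA_iff, List.any_eq_true]
  simp only [PySem.Set.contains_iff, mem_isExSet]
  constructor
  · rintro ⟨ex, he, hne, hcase⟩
    rcases hcase with hdeq | hsuf
    · exact ⟨d, List.mem_cons_self, ex, he, hdeq.symm, hdeq ▸ hne⟩
    · exact ⟨isExNorm ex, List.mem_cons.mpr (Or.inr ((mem_isExDotSuffixes d _).mpr hsuf)),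
        ex, he, rfl, hne⟩
  · rintro ⟨c, hc, ex, he, hceq, hne⟩
    subst hceq
    rcases List.mem_cons.mp hc with hdeq | hc'
    · exact ⟨ex, he, hne, Or.inl hdeq.symm⟩
    · exact ⟨ex, he, hne, Or.inr ((mem_isExDotSuffixes d _).mp hc')⟩
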